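-- pv_equiv track=rewrite | github.com/hyraxbio/simulated-data | seq2simulate/evolver/models.py | mutations
-- ===== SOURCE A (Python) =====
-- def mutations(seq1, seq2):
--     """
--     Returns list of mutation values: 0 for transversion, 1 for transition, -1 for neither.
--
--     Args:
--         seq1, seq2: nucleotide strings
--     """
--     mut_dict = {
--         'at': 1,
--         'ag': 0,
--         'ac': 1,
--         'ta': 1,
--         'tg': 1,
--         'tc': 0,
--         'ga': 0,
--         'gt': 1,
--         'gc': 1,
--         'ca': 1,
--         'ct': 0,
--         'cg': 1,
--     }
--     mutations = []
--     for i,j in zip(seq1, seq2):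
--         mutations.append(mut_dict.get(i+j, -1))
--     return mutations
-- ===== SOURCE B (Python) =====
-- def mutations(seq1, seq2):
--     def codes(seq):
--         return [0 if c in 'ag' else 1 if c in 'tc' else None for c in seq]
--     g1 = codes(seq1)
--     g2 = codes(seq2)
--     n = min(len(seq1), len(seq2))
--     return [-1 if g1[k] is None or g2[k] is None or seq1[k] == seq2[k]
--             else abs(g1[k] - g2[k])
--             for k in range(n)]
-- ===== Notes on version B (the rewrite author's own statement) =====
-- stated objective: alternative
-- what changed: A makes one fused zip-loop appending values from a hardcoded 12-entry pair table; B works in staged passes: it first encodes each sequence separately into purine/pyrimidine group codes, then combines the two code lists by index, computing each result arithmetically as abs(gx-gy) (with -1 for invalid or equal characters) instead of any pair lookup.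
import Mathlib
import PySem

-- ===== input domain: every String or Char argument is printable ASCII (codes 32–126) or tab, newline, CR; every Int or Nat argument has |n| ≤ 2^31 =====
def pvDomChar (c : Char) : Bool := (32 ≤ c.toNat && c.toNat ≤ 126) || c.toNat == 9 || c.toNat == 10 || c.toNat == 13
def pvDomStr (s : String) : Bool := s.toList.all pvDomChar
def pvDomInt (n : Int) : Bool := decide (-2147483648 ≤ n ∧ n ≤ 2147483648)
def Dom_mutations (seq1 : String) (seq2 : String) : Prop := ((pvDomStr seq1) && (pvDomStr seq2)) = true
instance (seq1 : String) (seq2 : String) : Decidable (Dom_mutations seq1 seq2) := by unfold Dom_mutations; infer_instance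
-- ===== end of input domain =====

-- B replaces A's fused zip-loop over a hardcoded 12-entry pair table by staged passes:
-- each sequence is first encoded into purine/pyrimidine group codes, then the two code
-- lists are combined by index arithmetically (objective: alternative).

-- ===== PORT A =====
-- the dict literal mut_dict; the two-character string key i+j is ported as the pair (i, j)
def mutDict : PySem.Dict (Char × Char) Int :=
  PySem.Dict.ofList [(('a','t'),1),(('a','g'),0),(('a','c'),1),(('t','a'),1),(('t','g'),1),(('t','c'),0),
    (('g','a'),0),(('g','t'),1),(('g','c'),1),(('c','a'),1),(('c','t'),0),(('c','g'),1)]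

def mutations (seq1 : String) (seq2 : String) : List Int :=
  (List.zip seq1.toList seq2.toList).foldl
    (fun muts p => muts ++ [mutDict.getD (p.1, p.2) (-1)]) []

-- ===== PORT B =====
-- 'c in "ag"' is PySem.Chars.isIn [c] on the string's characters (exact)
def codesB (s : List Char) : List (Option Int) :=
  s.map (fun c =>
    if PySem.Chars.isIn [c] ['a','g'] then some 0
    else if PySem.Chars.isIn [c] ['t','c'] then some 1
    else none)

def mutations_alt (seq1 : String) (seq2 : String) : List Int :=
  let g1 := codesB seq1.toList
  let g2 := codesB seq2.toList
  let n := min seq1.toList.length seq2.toList.length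
  (List.range n).map (fun k =>
    match g1[k]?, g2[k]? with
    | some (some gx), some (some gy) =>
        if seq1.toList[k]? == seq2.toList[k]? then -1 else |gx - gy|
    | _, _ => -1)

-- ===== PRECONDITION & SPEC =====
def Spec_mutations (seq1 : String) (seq2 : String) (out : List Int) : Prop := out = mutations_alt seq1 seq2
instance (seq1 : String) (seq2 : String) (out : List Int) : Decidable (Spec_mutations seq1 seq2 out) := by unfold Spec_mutations; infer_instance

-- ===== CLAIM (what is proved, stated in full; the proofs are below) =====
def Claim_equal_mutations : Prop := ∀ (seq1 : String) (seq2 : String), Dom_mutations seq1 seq2 → Spec_mutations seq1 seq2 (mutations seq1 seq2)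

-- ===== LEMMAS AND PROOFS =====

theorem mutDict_eq : mutDict = PySem.Dict.mk [(('a','t'),1),(('a','g'),0),(('a','c'),1),(('t','a'),1),(('t','g'),1),(('t','c'),0),
    (('g','a'),0),(('g','t'),1),(('g','c'),1),(('c','a'),1),(('c','t'),0),(('c','g'),1)] := by decide

-- the per-character group code B computes
def grpB (c : Char) : Option Int :=
  if PySem.Chars.isIn [c] ['a','g'] then some 0
  else if PySem.Chars.isIn [c] ['t','c'] then some 1
  else none

-- the per-pair value B computes
def stepB (x y : Char) : Int :=
  match grpB x, grpB y with
  | some gx, some gy => if x == y then -1 else |gx - gy|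
  | _, _ => -1

theorem char5 (i : Char) : i = 'a' ∨ i = 't' ∨ i = 'g' ∨ i = 'c' ∨ (i ≠ 'a' ∧ i ≠ 't' ∧ i ≠ 'g' ∧ i ≠ 'c') := by
  tauto

theorem isIn_singleton_false (i : Char) (l : List Char) (h : i ∉ l) :
    PySem.Chars.isIn [i] l = false := by
  rw [PySem.Chars.isIn_eq_false_iff]
  intro hinf
  exact h (by simpa using List.singleton_sublist.mp hinf.sublist)

theorem grpB_none (i : Char) (h1 : i ≠ 'a') (h2 : i ≠ 't') (h3 : i ≠ 'g') (h4 : i ≠ 'c') :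
    grpB i = none := by
  unfold grpB
  rw [isIn_singleton_false i ['a','g'] (by simp [h1, h3]),
      isIn_singleton_false i ['t','c'] (by simp [h2, h4])]
  simp

theorem missL (i j : Char) (h1 : i ≠ 'a') (h2 : i ≠ 't') (h3 : i ≠ 'g') (h4 : i ≠ 'c') :
    mutDict.getD (i, j) (-1) = -1 := by
  simp [mutDict_eq, PySem.Dict.getD_eq_get?_getD, Prod.ext_iff,
    Ne.symm h1, Ne.symm h2, Ne.symm h3, Ne.symm h4, PySem.Dict.get?]

theorem missR (i j : Char) (h1 : j ≠ 'a') (h2 : j ≠ 't') (h3 : j ≠ 'g') (h4 : j ≠ 'c') :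
    mutDict.getD (i, j) (-1) = -1 := by
  simp [mutDict_eq, PySem.Dict.getD_eq_get?_getD, Prod.ext_iff,
    Ne.symm h1, Ne.symm h2, Ne.symm h3, Ne.symm h4, PySem.Dict.get?]

theorem step_eq (i j : Char) : mutDict.getD (i, j) (-1) = stepB i j := by
  rcases char5 i with hi|hi|hi|hi|⟨hi1,hi2,hi3,hi4⟩
  all_goals try (
    rcases char5 j with hj|hj|hj|hj|⟨hj1,hj2,hj3,hj4⟩ <;> subst_vars <;>
      first
      | decide
      | (rw [missR _ _ hj1 hj2 hj3 hj4]; simp [stepB, grpB_none j hj1 hj2 hj3 hj4]))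
  rw [missL _ _ hi1 hi2 hi3 hi4]; simp [stepB, grpB_none i hi1 hi2 hi3 hi4]

theorem foldl_append_map {α β : Type} (f : α → β) (l : List α) (acc : List β) :
    l.foldl (fun a x => a ++ [f x]) acc = acc ++ l.map f := by
  induction l generalizing acc with
  | nil => simp
  | cons x xs ih => simp [List.foldl_cons, ih]

-- B's staged computation, characterised as a map over the zipped characters
theorem mutations_alt_eq_map (seq1 seq2 : String) :
    mutations_alt seq1 seq2 = (List.zip seq1.toList seq2.toList).map (fun p => stepB p.1 p.2) := by
  unfold mutations_alt
  apply List.ext_getElem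
  · simp [codesB, List.length_zip]
  · intro k h1 h2
    have hk : k < min seq1.toList.length seq2.toList.length := by simpa using h1
    have hk1 : k < seq1.toList.length := lt_of_lt_of_le hk (min_le_left _ _)
    have hk2 : k < seq2.toList.length := lt_of_lt_of_le hk (min_le_right _ _)
    simp only [List.getElem_map, List.getElem_range, List.getElem_zip, codesB,
      List.getElem?_map]
    rw [List.getElem?_eq_getElem hk1, List.getElem?_eq_getElem hk2]
    simp only [Option.map_some, stepB, grpB, beq_iff_eq, Option.some_inj]
    split_ifs <;> rfl

-- ===== VERDICT (by name: the statement is the Claim_ definition above) =====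
theorem mutations_spec : Claim_equal_mutations := by
  intro seq1 seq2 _
  unfold Spec_mutations
  rw [mutations_alt_eq_map]
  unfold mutations
  rw [foldl_append_map (fun p : Char × Char => mutDict.getD (p.1, p.2) (-1))]
  simp only [List.nil_append]
  exact List.map_congr_left (fun p _ => step_eq p.1 p.2)
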